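-- pv_equiv track=rewrite | github.com/Mitokongdrya/ClearText | Common Words/common_words.py | categorize_frequencies
-- ===== SOURCE A (Python) =====
-- def categorize_frequencies(word_counts, total_files):
--     categories = {
--         f"Words in ALL {total_files} Files": [],
--         f"Words in MOST Files ({total_files-1})": [],
--         "Words in SOME Files (2+)": [],
--         "Unique Words (1 file only)": []
--     }
--
--     for word, count in word_counts.items():
--         if count == total_files:
--             categories[f"Words in ALL {total_files} Files"].append((word, count))
--         elif count == total_files - 1:
--             categories[f"Words in MOST Files ({total_files-1})"].append((word, count))
--         elif count >= 2:
--             categories["Words in SOME Files (2+)"].append((word, count))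
--         else:
--             categories["Unique Words (1 file only)"].append((word, count))
--
--     return categories
-- ===== SOURCE B (Python) =====
-- def categorize_frequencies(word_counts, total_files):
--     # Same result, different decomposition: four independent filter passes,
--     # one per bucket, instead of one dispatching loop.
--     items = list(word_counts.items())
--     return {
--         f"Words in ALL {total_files} Files":
--             [(w, c) for w, c in items if c == total_files],
--         f"Words in MOST Files ({total_files-1})":
--             [(w, c) for w, c in items if c == total_files - 1],
--         "Words in SOME Files (2+)":
--             [(w, c) for w, c in items
--              if c >= 2 and c != total_files and c != total_files - 1],
--         "Unique Words (1 file only)":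
--             [(w, c) for w, c in items
--              if c < 2 and c != total_files and c != total_files - 1],
--     }
-- ===== Notes on version B (the rewrite author's own statement) =====
-- stated objective: alternative
-- what changed: Replaced the single dispatching loop (append into the dict bucket chosen by an if/elif chain) by four independent filter comprehensions, one per bucket, with mutually exclusive closed-form conditions encoding the elif priority.
import Mathlib
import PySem

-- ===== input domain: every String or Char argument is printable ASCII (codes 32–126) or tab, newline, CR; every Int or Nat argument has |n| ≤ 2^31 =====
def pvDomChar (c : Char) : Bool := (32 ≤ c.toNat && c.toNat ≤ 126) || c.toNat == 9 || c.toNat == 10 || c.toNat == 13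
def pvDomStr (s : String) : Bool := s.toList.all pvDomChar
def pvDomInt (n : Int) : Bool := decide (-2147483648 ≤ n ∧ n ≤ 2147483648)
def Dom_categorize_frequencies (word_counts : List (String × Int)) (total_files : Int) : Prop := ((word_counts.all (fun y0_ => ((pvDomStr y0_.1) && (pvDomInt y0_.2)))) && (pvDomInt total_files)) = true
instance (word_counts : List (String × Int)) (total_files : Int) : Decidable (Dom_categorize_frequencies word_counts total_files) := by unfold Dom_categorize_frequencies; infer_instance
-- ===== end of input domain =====

-- B replaces A's single dispatching loop by four independent filter passes (one per bucket); alternative decomposition, same O(n) cost.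


-- ===== PORT A =====
-- the four f-string keys (PySem.Int.toChars t = the characters of str(t)); shared by both ports as both Pythons build the same key strings
def keyAll (t : Int) : String :=
  String.ofList (['W','o','r','d','s',' ','i','n',' ','A','L','L',' '] ++ PySem.Int.toChars t ++ [' ','F','i','l','e','s'])
def keyMost (t : Int) : String :=
  String.ofList (['W','o','r','d','s',' ','i','n',' ','M','O','S','T',' ','F','i','l','e','s',' ','('] ++ PySem.Int.toChars (t-1) ++ [')'])
def keySome : String := "Words in SOME Files (2+)"
def keyUniq : String := "Unique Words (1 file only)"

-- A: dict literal with four (always distinct) keys, then one loop appending each item into the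
-- bucket picked by the if/elif chain; `categories[k].append(p)` = Dict.modify k [] (· ++ [p])
-- (the key is always present, so Python's KeyError case is unreachable).
def categorize_frequencies (word_counts : List (String × Int)) (total_files : Int) : List (String × List (String × Int)) :=
  let categories : PySem.Dict String (List (String × Int)) :=
    PySem.Dict.mk [(keyAll total_files, []), (keyMost total_files, []), (keySome, []), (keyUniq, [])]
  (word_counts.foldl (fun d p =>
      if p.2 == total_files then d.modify (keyAll total_files) [] (· ++ [p])
      else if p.2 == total_files - 1 then d.modify (keyMost total_files) [] (· ++ [p])
      else if 2 ≤ p.2 then d.modify keySome [] (· ++ [p])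
      else d.modify keyUniq [] (· ++ [p])) categories).items

-- ===== PORT B =====
-- B: the dict is assembled directly from four independent filter passes with mutually exclusive conditions.
def categorize_frequencies_alt (word_counts : List (String × Int)) (total_files : Int) : List (String × List (String × Int)) :=
  [(keyAll total_files, word_counts.filter (fun p => p.2 == total_files)),
   (keyMost total_files, word_counts.filter (fun p => p.2 == total_files - 1)),
   (keySome, word_counts.filter (fun p => decide (2 ≤ p.2) && !(p.2 == total_files) && !(p.2 == total_files - 1))),
   (keyUniq, word_counts.filter (fun p => decide (p.2 < 2) && !(p.2 == total_files) && !(p.2 == total_files - 1)))]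

-- ===== PRECONDITION & SPEC =====
def Spec_categorize_frequencies (word_counts : List (String × Int)) (total_files : Int) (out : List (String × List (String × Int))) : Prop := out = categorize_frequencies_alt word_counts total_files
instance (word_counts : List (String × Int)) (total_files : Int) (out : List (String × List (String × Int))) : Decidable (Spec_categorize_frequencies word_counts total_files out) := by unfold Spec_categorize_frequencies; infer_instance

-- ===== CLAIM (what is proved, stated in full; the proofs are below) =====
def Claim_equal_categorize_frequencies : Prop := ∀ (word_counts : List (String × Int)) (total_files : Int), Dom_categorize_frequencies word_counts total_files → Spec_categorize_frequencies word_counts total_files (categorize_frequencies word_counts total_files)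

-- ===== LEMMAS AND PROOFS =====

-- the four keys are pairwise distinct for every t (they differ inside their fixed prefixes)
theorem kAM (t : Int) : (keyAll t == keyMost t) = false := by
  simp [keyAll, keyMost, String.ofList_inj]
theorem kAS (t : Int) : (keyAll t == keySome) = false := by
  rw [beq_eq_false_iff_ne]; intro h
  have := congrArg String.toList h; simp [keyAll, keySome] at this
theorem kAU (t : Int) : (keyAll t == keyUniq) = false := by
  rw [beq_eq_false_iff_ne]; intro h
  have := congrArg String.toList h; simp [keyAll, keyUniq] at this
theorem kMS (t : Int) : (keyMost t == keySome) = false := by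
  rw [beq_eq_false_iff_ne]; intro h
  have := congrArg String.toList h; simp [keyMost, keySome] at this
theorem kMU (t : Int) : (keyMost t == keyUniq) = false := by
  rw [beq_eq_false_iff_ne]; intro h
  have := congrArg String.toList h; simp [keyMost, keyUniq] at this
theorem kSU : (keySome == keyUniq) = false := by decide
theorem kMA (t : Int) : (keyMost t == keyAll t) = false := by
  simp [keyAll, keyMost, String.ofList_inj]
theorem kSA (t : Int) : (keySome == keyAll t) = false := by
  rw [beq_eq_false_iff_ne]; intro h
  have := congrArg String.toList h; simp [keyAll, keySome] at this
theorem kSM (t : Int) : (keySome == keyMost t) = false := by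
  rw [beq_eq_false_iff_ne]; intro h
  have := congrArg String.toList h; simp [keyMost, keySome] at this
theorem kUA (t : Int) : (keyUniq == keyAll t) = false := by
  rw [beq_eq_false_iff_ne]; intro h
  have := congrArg String.toList h; simp [keyAll, keyUniq] at this
theorem kUM (t : Int) : (keyUniq == keyMost t) = false := by
  rw [beq_eq_false_iff_ne]; intro h
  have := congrArg String.toList h; simp [keyMost, keyUniq] at this
theorem kUS : (keyUniq == keySome) = false := by decide

-- modify at each of the four keys on a four-bucket literal dict appends into exactly that bucket
theorem modAll (t : Int) (p : String × Int) (a m s u : List (String × Int)) :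
    ((PySem.Dict.mk [(keyAll t, a), (keyMost t, m), (keySome, s), (keyUniq, u)]).modify (keyAll t) [] (· ++ [p]))
    = PySem.Dict.mk [(keyAll t, a ++ [p]), (keyMost t, m), (keySome, s), (keyUniq, u)] := by
  have h1 : ¬ (keyMost t = keyAll t) := by simpa using kMA t
  have h2 : ¬ (keySome = keyAll t) := by simpa using kSA t
  have h3 : ¬ (keyUniq = keyAll t) := by simpa using kUA t
  simp [PySem.Dict.modify, PySem.Dict.insert, PySem.Dict.getD, PySem.Dict.get?,
    PySem.Dict.contains, h1, h2, h3]

theorem modMost (t : Int) (p : String × Int) (a m s u : List (String × Int)) :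
    ((PySem.Dict.mk [(keyAll t, a), (keyMost t, m), (keySome, s), (keyUniq, u)]).modify (keyMost t) [] (· ++ [p]))
    = PySem.Dict.mk [(keyAll t, a), (keyMost t, m ++ [p]), (keySome, s), (keyUniq, u)] := by
  have h1 : ¬ (keyAll t = keyMost t) := by simpa using kAM t
  have h2 : ¬ (keySome = keyMost t) := by simpa using kSM t
  have h3 : ¬ (keyUniq = keyMost t) := by simpa using kUM t
  simp [PySem.Dict.modify, PySem.Dict.insert, PySem.Dict.getD, PySem.Dict.get?,
    PySem.Dict.contains, h1, h2, h3]

theorem modSome (t : Int) (p : String × Int) (a m s u : List (String × Int)) :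
    ((PySem.Dict.mk [(keyAll t, a), (keyMost t, m), (keySome, s), (keyUniq, u)]).modify keySome [] (· ++ [p]))
    = PySem.Dict.mk [(keyAll t, a), (keyMost t, m), (keySome, s ++ [p]), (keyUniq, u)] := by
  have h1 : ¬ (keyAll t = keySome) := by simpa using kAS t
  have h2 : ¬ (keyMost t = keySome) := by simpa using kMS t
  have h3 : ¬ (keyUniq = keySome) := by simpa using kUS
  simp [PySem.Dict.modify, PySem.Dict.insert, PySem.Dict.getD, PySem.Dict.get?,
    PySem.Dict.contains, h1, h2, h3]

theorem modUniq (t : Int) (p : String × Int) (a m s u : List (String × Int)) :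
    ((PySem.Dict.mk [(keyAll t, a), (keyMost t, m), (keySome, s), (keyUniq, u)]).modify keyUniq [] (· ++ [p]))
    = PySem.Dict.mk [(keyAll t, a), (keyMost t, m), (keySome, s), (keyUniq, u ++ [p])] := by
  have h1 : ¬ (keyAll t = keyUniq) := by simpa using kAU t
  have h2 : ¬ (keyMost t = keyUniq) := by simpa using kMU t
  have h3 : ¬ (keySome = keyUniq) := by simpa using kSU
  simp [PySem.Dict.modify, PySem.Dict.insert, PySem.Dict.getD, PySem.Dict.get?,
    PySem.Dict.contains, h1, h2, h3]

-- loop invariant: from a four-bucket literal dict, A's loop appends exactly B's four filters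
theorem loop_items (t : Int) (l : List (String × Int)) :
    ∀ (a m s u : List (String × Int)),
    ((l.foldl (fun d p =>
        if p.2 == t then d.modify (keyAll t) [] (· ++ [p])
        else if p.2 == t - 1 then d.modify (keyMost t) [] (· ++ [p])
        else if 2 ≤ p.2 then d.modify keySome [] (· ++ [p])
        else d.modify keyUniq [] (· ++ [p]))
      (PySem.Dict.mk [(keyAll t, a), (keyMost t, m), (keySome, s), (keyUniq, u)]))).items
    = [(keyAll t, a ++ l.filter (fun p => p.2 == t)),
       (keyMost t, m ++ l.filter (fun p => p.2 == t - 1)),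
       (keySome, s ++ l.filter (fun p => decide (2 ≤ p.2) && !(p.2 == t) && !(p.2 == t - 1))),
       (keyUniq, u ++ l.filter (fun p => decide (p.2 < 2) && !(p.2 == t) && !(p.2 == t - 1)))] := by
  induction l with
  | nil => intro a m s u; simp
  | cons p rest ih =>
    intro a m s u
    simp only [List.foldl_cons]
    by_cases hA : p.2 = t
    · rw [if_pos (by simp [hA]), modAll, ih]
      have h1 : (p.2 == t) = true := by simp [hA]
      have hM : (p.2 == t - 1) = false := by simp; omega
      simp [h1, hM]
    · have h1 : (p.2 == t) = false := by simp [hA]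
      rw [if_neg (by simp [hA])]
      by_cases hM : p.2 = t - 1
      · rw [if_pos (by simp [hM]), modMost, ih]
        have h2 : (p.2 == t - 1) = true := by simp [hM]
        simp [h1, h2]
      · have h2 : (p.2 == t - 1) = false := by simp [hM]
        rw [if_neg (by simp [hM])]
        by_cases hS : 2 ≤ p.2
        · rw [if_pos hS, modSome, ih]
          have hU : decide (p.2 ≤ (1:Int)) = false := by simp; omega
          simp [h1, h2, hS, hU]
        · rw [if_neg hS, modUniq, ih]
          have hU : decide (p.2 ≤ (1:Int)) = true := by simp; omega
          simp [h1, h2, hS, hU]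

-- ===== VERDICT (by name: the statement is the Claim_ definition above) =====
theorem categorize_frequencies_spec : Claim_equal_categorize_frequencies := by
  intro wc t _
  unfold Spec_categorize_frequencies categorize_frequencies categorize_frequencies_alt
  simpa using loop_items t wc [] [] [] []
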